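-- pv_equiv track=rewrite | github.com/Turki20/HallaOrder | reports/views_sales.py | _score_by_edges
-- ===== SOURCE A (Python) =====
-- def _score_by_edges(v, edges, reverse=False):
--     if v is None:
--         return 1
--     rank = 1
--     for e in edges:
--         if (v <= e if reverse else v >= e):
--             rank += 1
--     return max(1, min(rank, 5))
-- ===== SOURCE B (Python) =====
-- def _score_by_edges(v, edges, reverse=False):
--     if v is None:
--         return 1
--     s = sorted(edges)
--     lo, hi = 0, len(s)
--     while lo < hi:
--         mid = (lo + hi) // 2
--         if (s[mid] < v) if reverse else (s[mid] <= v):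
--             lo = mid + 1
--         else:
--             hi = mid
--     count = len(s) - lo if reverse else lo
--     return max(1, min(1 + count, 5))
-- ===== Notes on version B (the rewrite author's own statement) =====
-- stated objective: alternative
-- what changed: Replaces the linear counting loop by sorting a copy of edges and locating the inclusive cut point with a hand-written binary search (bisect_right for forward, len - bisect_left for reverse), then clamping 1+count into [1,5].
import Mathlib
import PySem

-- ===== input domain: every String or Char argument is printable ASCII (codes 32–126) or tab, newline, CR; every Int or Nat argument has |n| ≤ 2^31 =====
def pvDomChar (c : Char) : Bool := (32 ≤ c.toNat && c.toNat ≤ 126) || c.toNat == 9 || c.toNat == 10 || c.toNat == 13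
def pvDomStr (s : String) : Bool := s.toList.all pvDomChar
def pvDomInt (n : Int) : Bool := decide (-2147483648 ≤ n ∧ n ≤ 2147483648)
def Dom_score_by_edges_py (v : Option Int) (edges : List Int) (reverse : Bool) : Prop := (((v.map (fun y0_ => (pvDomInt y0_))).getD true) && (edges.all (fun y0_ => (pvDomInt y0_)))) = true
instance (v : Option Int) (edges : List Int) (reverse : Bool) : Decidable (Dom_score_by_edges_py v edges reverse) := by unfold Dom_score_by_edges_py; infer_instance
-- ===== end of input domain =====

-- B replaces A's linear counting loop by sorting a copy of edges and binary-searching the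
-- inclusive cut point (alternative decomposition; arguments are not mutated by either version).

-- ===== PORT A =====
def score_by_edges_py (v : Option Int) (edges : List Int) (reverse : Bool) : Int :=
  match v with
  | none => 1
  | some v =>
    let rank : Int :=
      edges.foldl (fun rank e => if (if reverse then v ≤ e else v ≥ e) then rank + 1 else rank) 1
    max 1 (min rank 5)

-- ===== PORT B =====
-- the while-loop of Source B: lo/hi narrowing; s[mid] is ported as getD mid 0, exact because
-- mid is always in range (0 ≤ lo ≤ mid < hi ≤ len s)
def pvBisect (s : List Int) (v : Int) (reverse : Bool) (lo hi : Nat) : Nat :=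
  if _h : lo < hi then
    let mid := (lo + hi) / 2
    if (if reverse then s.getD mid 0 < v else s.getD mid 0 ≤ v) then
      pvBisect s v reverse (mid + 1) hi
    else
      pvBisect s v reverse lo mid
  else lo
termination_by hi - lo
decreasing_by all_goals omega

def score_by_edges_py_alt (v : Option Int) (edges : List Int) (reverse : Bool) : Int :=
  match v with
  | none => 1
  | some v =>
    let s := PySem.List.sorted edges (fun x => x) false
    let lo := pvBisect s v reverse 0 s.length
    let count : Int := if reverse then (s.length : Int) - (lo : Int) else (lo : Int)
    max 1 (min (1 + count) 5)

-- ===== PRECONDITION & SPEC =====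
def Spec_score_by_edges_py (v : Option Int) (edges : List Int) (reverse : Bool) (out : Int) : Prop := out = score_by_edges_py_alt v edges reverse
instance (v : Option Int) (edges : List Int) (reverse : Bool) (out : Int) : Decidable (Spec_score_by_edges_py v edges reverse out) := by unfold Spec_score_by_edges_py; infer_instance

-- ===== CLAIM (what is proved, stated in full; the proofs are below) =====
def Claim_equal_score_by_edges_py : Prop := ∀ (v : Option Int) (edges : List Int) (reverse : Bool), Dom_score_by_edges_py v edges reverse → Spec_score_by_edges_py v edges reverse (score_by_edges_py v edges reverse)

-- ===== LEMMAS AND PROOFS =====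

-- In a sorted list, a downward-closed predicate holds exactly on the first countP-many positions.
theorem pvCut_iff (P : Int → Prop) [DecidablePred P]
    (hmono : ∀ x y : Int, x ≤ y → P y → P x)
    (s : List Int) (hs : s.Pairwise (· ≤ ·)) (i : Nat) (hi : i < s.length) :
    P s[i] ↔ i < s.countP (fun x => decide (P x)) := by
  induction s generalizing i with
  | nil => simp at hi
  | cons a t ih =>
    rcases List.pairwise_cons.mp hs with ⟨ha, ht⟩
    by_cases hPa : P a
    · cases i with
      | zero => simp [List.countP_cons, hPa]
      | succ j =>
        have hj : j < t.length := by simpa using hi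
        have hrec := ih ht j hj
        have hgc : (a :: t)[j+1] = t[j] := rfl
        rw [hgc, hrec, List.countP_cons, if_pos (decide_eq_true hPa)]
        omega
    · -- a fails P; every element of the tail is ≥ a, so it fails P too
      have hall : ∀ x ∈ t, ¬ P x := fun x hx hPx => hPa (hmono a x (ha x hx) hPx)
      have hc : (a :: t).countP (fun x => decide (P x)) = 0 := by
        rw [List.countP_eq_zero]
        intro x hx
        rcases List.mem_cons.mp hx with rfl | hx'
        · simpa using hPa
        · simpa using hall x hx'
      rw [hc]
      constructor
      · intro hP
        exfalso
        cases i with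
        | zero => exact hPa (by simpa using hP)
        | succ j =>
          have hj : j < t.length := by simpa using hi
          exact hall _ (List.getElem_mem hj) (by simpa using hP)
      · omega

-- the binary search of Source B finds the cut point c = countP of the downward-closed test
theorem pvBisect_eq (s : List Int) (v : Int) (rv : Bool) (hs : s.Pairwise (· ≤ ·))
    (c : Nat)
    (hc : c = s.countP (fun x => if rv then decide (x < v) else decide (x ≤ v))) :
    ∀ fuel lo hi, hi - lo ≤ fuel → lo ≤ c → c ≤ hi → hi ≤ s.length →
      pvBisect s v rv lo hi = c := by
  have hcut : ∀ i (hi : i < s.length),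
      (if rv then s[i] < v else s[i] ≤ v) ↔ i < c := by
    intro i hi
    cases rv with
    | false =>
      simpa [hc] using pvCut_iff (fun x => x ≤ v) (fun x y hxy h => le_trans hxy h) s hs i hi
    | true =>
      simpa [hc] using pvCut_iff (fun x => x < v) (fun x y hxy h => lt_of_le_of_lt hxy h) s hs i hi
  intro fuel
  induction fuel with
  | zero =>
    intro lo hi hf hlo hhi _
    rw [pvBisect]
    have : ¬ lo < hi := by omega
    simp only [this, dif_neg, not_false_iff]
    omega
  | succ n ih =>
    intro lo hi hf hlo hhi hlen
    rw [pvBisect]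
    by_cases h : lo < hi
    · simp only [h, dif_pos]
      set mid := (lo + hi) / 2 with hmid
      have hmr : mid < s.length := by omega
      have hget : s.getD mid 0 = s[mid] := List.getD_eq_getElem s 0 hmr
      have hiff := hcut mid hmr
      by_cases hcond : (if rv then s.getD mid 0 < v else s.getD mid 0 ≤ v)
      · rw [if_pos hcond]
        simp only [hget] at hcond
        have hmc : mid < c := hiff.mp hcond
        exact ih (mid + 1) hi (by omega) (by omega) hhi hlen
      · rw [if_neg hcond]
        simp only [hget] at hcond
        have hmc : c ≤ mid := by
          by_contra hlt
          exact hcond (hiff.mpr (by omega))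
        exact ih lo mid (by omega) hlo hmc (by omega)
    · simp only [h, dif_neg, not_false_iff]
      omega

-- complement count: #{x < v} + #{v ≤ x} = length
theorem pvCountP_compl (s : List Int) (v : Int) :
    s.countP (fun x => decide (x < v)) + s.countP (fun x => decide (v ≤ x)) = s.length := by
  induction s with
  | nil => rfl
  | cons a t ih =>
    by_cases h : a < v <;>
      simp [List.countP_cons, h, not_lt.mp, not_le.mpr] <;> omega

-- ===== VERDICT (by name: the statement is the Claim_ definition above) =====
theorem score_by_edges_py_spec : Claim_equal_score_by_edges_py := by
  intro v edges reverse _dom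
  unfold Spec_score_by_edges_py score_by_edges_py score_by_edges_py_alt
  cases v with
  | none => rfl
  | some v =>
    simp only
    set s := PySem.List.sorted edges (fun x => x) false with hsdef
    have hperm : s.Perm edges := PySem.List.sorted_perm edges (fun x => x) false
    have hs : s.Pairwise (· ≤ ·) := by
      simpa using PySem.List.sorted_pairwise edges (fun x => x)
    cases reverse with
    | false =>
      have hb := pvBisect_eq s v false hs
        (s.countP (fun x => decide (x ≤ v))) (by simp) s.length 0 s.length
        (by omega) (by simpa using List.countP_le_length) List.countP_le_length le_rfl
      have hrank := PySem.List.foldl_ite_add_one (fun e : Int => v ≥ e)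
        (l := edges) (a := (1 : Int))
      have hcount : edges.countP (fun x => decide (v ≥ x)) = s.countP (fun x => decide (x ≤ v)) := by
        rw [hperm.countP_eq]
      rw [hb]
      simp only [Bool.false_eq_true, if_false]
      rw [hrank, hcount]
    | true =>
      have hb := pvBisect_eq s v true hs
        (s.countP (fun x => decide (x < v))) (by simp) s.length 0 s.length
        (by omega) (by simpa using List.countP_le_length) List.countP_le_length le_rfl
      have hrank := PySem.List.foldl_ite_add_one (fun e : Int => v ≤ e)
        (l := edges) (a := (1 : Int))
      have hcompl := pvCountP_compl s v
      have hpc : edges.countP (fun x => decide (v ≤ x)) = s.countP (fun x => decide (v ≤ x)) :=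
        (hperm.countP_eq _).symm
      rw [hb]
      simp only [if_pos trivial]
      rw [hrank]
      have : (s.length : Int) - (s.countP (fun x => decide (x < v)) : Int)
           = (edges.countP (fun x => decide (v ≤ x)) : Int) := by
        rw [hpc]; omega
      rw [this]
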